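-- pv_equiv track=rewrite | github.com/enzogirardi84/medicare-pro-v2 | core/clinical_exports.py | _record_matches_patient
-- ===== SOURCE A (Python) =====
-- def _split_patient_visual_id(paciente_sel):
--     texto = str(paciente_sel or "").strip()
--     if " - " not in texto:
--         return texto, ""
--     nombre, dni = texto.rsplit(" - ", 1)
--     return nombre.strip(), dni.strip()
--
-- def _normalize_patient_name(nombre):
--     return " ".join(str(nombre or "").strip().lower().split())
--
-- def _record_matches_patient(record, paciente_sel, ctx):
--     if not isinstance(record, dict):
--         return False
--
--     candidatos = []
--     for clave in ("paciente", "paciente_id", "dni"):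
--         valor = record.get(clave)
--         if valor not in (None, ""):
--             candidatos.append(str(valor).strip())
--
--     if paciente_sel and any(valor == paciente_sel for valor in candidatos):
--         return True
--
--     dni_ref = str(ctx.get("dni") or "").strip()
--     if dni_ref:
--         for valor in candidatos:
--             _, dni_valor = _split_patient_visual_id(valor)
--             if dni_valor and dni_valor == dni_ref:
--                 return True
--             if valor == dni_ref:
--                 return True
--
--     nombre_ref = _normalize_patient_name(ctx.get("nombre"))
--     if not nombre_ref:
--         return False
--
--     for valor in candidatos:
--         nombre_valor, dni_valor = _split_patient_visual_id(valor)
--         if dni_ref and dni_valor and dni_valor != dni_ref: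
--             continue
--         if _normalize_patient_name(nombre_valor) == nombre_ref:
--             return True
--     return False
-- ===== SOURCE B (Python) =====
-- def _split_patient_visual_id(paciente_sel):
--     texto = str(paciente_sel or "").strip()
--     if " - " not in texto:
--         return texto, ""
--     nombre, dni = texto.rsplit(" - ", 1)
--     return nombre.strip(), dni.strip()
--
-- def _normalize_patient_name(nombre):
--     return " ".join(str(nombre or "").strip().lower().split())
--
-- def _record_matches_patient(record, paciente_sel, ctx):
--     # Single pass: precompute both references, then test every criterion
--     # per candidate in one loop with one split per candidate.
--     if not isinstance(record, dict):
--         return False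
--     dni_ref = str(ctx.get("dni") or "").strip()
--     nombre_ref = _normalize_patient_name(ctx.get("nombre"))
--     for clave in ("paciente", "paciente_id", "dni"):
--         valor = record.get(clave)
--         if valor in (None, ""):
--             continue
--         valor = str(valor).strip()
--         nombre_valor, dni_valor = _split_patient_visual_id(valor)
--         if paciente_sel and valor == paciente_sel:
--             return True
--         if dni_ref and ((dni_valor and dni_valor == dni_ref) or valor == dni_ref):
--             return True
--         if (nombre_ref
--                 and not (dni_ref and dni_valor and dni_valor != dni_ref)
--                 and _normalize_patient_name(nombre_valor) == nombre_ref):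
--             return True
--     return False
-- ===== Notes on version B (the rewrite author's own statement) =====
-- stated objective: alternative
-- what changed: A runs up to three separate passes over the candidate list (exact-id any(), a DNI loop, then a name loop each re-splitting the candidate); B precomputes dni_ref and nombre_ref once and does a single pass over the candidates, splitting each candidate once and testing all three criteria per candidate with the same truthiness guards.
import Mathlib
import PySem

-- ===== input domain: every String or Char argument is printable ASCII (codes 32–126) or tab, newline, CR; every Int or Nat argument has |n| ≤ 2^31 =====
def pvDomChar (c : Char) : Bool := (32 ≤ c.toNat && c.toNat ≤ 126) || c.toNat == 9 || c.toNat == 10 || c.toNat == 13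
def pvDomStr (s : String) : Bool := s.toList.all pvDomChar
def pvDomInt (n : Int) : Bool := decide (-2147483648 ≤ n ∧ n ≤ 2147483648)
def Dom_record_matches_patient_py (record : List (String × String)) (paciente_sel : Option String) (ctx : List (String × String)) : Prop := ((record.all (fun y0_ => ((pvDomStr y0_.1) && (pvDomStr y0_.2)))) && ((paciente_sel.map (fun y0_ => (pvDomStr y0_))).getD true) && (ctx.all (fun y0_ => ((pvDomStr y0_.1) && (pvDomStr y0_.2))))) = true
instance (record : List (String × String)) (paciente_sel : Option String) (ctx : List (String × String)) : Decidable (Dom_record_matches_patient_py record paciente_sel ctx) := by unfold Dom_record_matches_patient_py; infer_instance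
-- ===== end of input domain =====

-- B fuses A's three criterion loops into one pass over the candidates, splitting each
-- candidate once and testing all three criteria per candidate (objective: alternative).

-- ===== PORT A =====

-- `texto.rsplit(" - ", 1)` (known to occur) ported by hand via rfind: exact, since
-- rsplit(sep, 1) splits at the HIGHEST occurrence of sep.
def splitPatientVisualId (s : String) : String × String :=
  let texto := PySem.Str.strip s
  if PySem.Str.isIn " - " texto = false then (texto, "")
  else
    let i := PySem.Str.rfind texto " - "
    (PySem.Str.strip (PySem.Str.slice texto none (some i)),
     PySem.Str.strip (PySem.Str.slice texto (some (i + 3)) none))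

def normalizePatientName (s : String) : String :=
  PySem.Str.join " " (PySem.Str.split₀ (PySem.Str.lower (PySem.Str.strip s)))

-- truthiness of Optional[str]: None and "" are falsy
def pacTruthy (pac : Option String) : Bool :=
  match pac with
  | none => false
  | some s => s ≠ ""

def record_matches_patient_py (record : List (String × String)) (paciente_sel : Option String) (ctx : List (String × String)) : Bool :=
  let rd := PySem.Dict.mk record
  let cd := PySem.Dict.mk ctx
  let candidatos := (["paciente", "paciente_id", "dni"]).foldl (fun acc clave =>
    match PySem.Dict.get? rd clave with
    | none => acc
    | some valor => if valor = "" then acc else acc ++ [PySem.Str.strip valor]) []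
  if pacTruthy paciente_sel && candidatos.any (fun valor => paciente_sel == some valor) then true
  else
    let dni_ref := PySem.Str.strip ((PySem.Dict.get? cd "dni").getD "")
    if dni_ref ≠ "" && candidatos.any (fun valor =>
        let dni_valor := (splitPatientVisualId valor).2
        (dni_valor ≠ "" && dni_valor == dni_ref) || valor == dni_ref) then true
    else
      let nombre_ref := normalizePatientName ((PySem.Dict.get? cd "nombre").getD "")
      if nombre_ref = "" then false
      else candidatos.any (fun valor =>
        let p := splitPatientVisualId valor
        if dni_ref ≠ "" && p.2 ≠ "" && p.2 ≠ dni_ref then false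
        else normalizePatientName p.1 == nombre_ref)

-- ===== PORT B =====

-- the fused single-pass loop of Source B (early return True → short-circuit recursion)
def altLoop (rd : PySem.Dict String String) (pac : Option String) (dni_ref nombre_ref : String) : List String → Bool
  | [] => false
  | clave :: rest =>
    let hit :=
      match PySem.Dict.get? rd clave with
      | none => false
      | some v =>
        if v = "" then false
        else
          let valor := PySem.Str.strip v
          let p := splitPatientVisualId valor
          (pacTruthy pac && pac == some valor)
          || (dni_ref ≠ "" && ((p.2 ≠ "" && p.2 == dni_ref) || valor == dni_ref))
          || (nombre_ref ≠ "" && !(dni_ref ≠ "" && p.2 ≠ "" && p.2 ≠ dni_ref)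
              && normalizePatientName p.1 == nombre_ref)
    if hit then true else altLoop rd pac dni_ref nombre_ref rest

def record_matches_patient_py_alt (record : List (String × String)) (paciente_sel : Option String) (ctx : List (String × String)) : Bool :=
  let cd := PySem.Dict.mk ctx
  let dni_ref := PySem.Str.strip ((PySem.Dict.get? cd "dni").getD "")
  let nombre_ref := normalizePatientName ((PySem.Dict.get? cd "nombre").getD "")
  altLoop (PySem.Dict.mk record) paciente_sel dni_ref nombre_ref ["paciente", "paciente_id", "dni"]

-- ===== PRECONDITION & SPEC =====
def Spec_record_matches_patient_py (record : List (String × String)) (paciente_sel : Option String) (ctx : List (String × String)) (out : Bool) : Prop := out = record_matches_patient_py_alt record paciente_sel ctx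
instance (record : List (String × String)) (paciente_sel : Option String) (ctx : List (String × String)) (out : Bool) : Decidable (Spec_record_matches_patient_py record paciente_sel ctx out) := by unfold Spec_record_matches_patient_py; infer_instance

-- ===== CLAIM (what is proved, stated in full; the proofs are below) =====
def Claim_equal_record_matches_patient_py : Prop := ∀ (record : List (String × String)) (paciente_sel : Option String) (ctx : List (String × String)), Dom_record_matches_patient_py record paciente_sel ctx → Spec_record_matches_patient_py record paciente_sel ctx (record_matches_patient_py record paciente_sel ctx)

-- ===== LEMMAS AND PROOFS =====

-- the candidate a clave contributes, if any
def candOf (rd : PySem.Dict String String) (clave : String) : Option String :=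
  match PySem.Dict.get? rd clave with
  | none => none
  | some v => if v = "" then none else some (PySem.Str.strip v)

lemma foldl_cands (rd : PySem.Dict String String) (claves : List String) (acc : List String) :
    claves.foldl (fun acc clave =>
      match PySem.Dict.get? rd clave with
      | none => acc
      | some valor => if valor = "" then acc else acc ++ [PySem.Str.strip valor]) acc
    = acc ++ claves.filterMap (candOf rd) := by
  induction claves generalizing acc with
  | nil => simp
  | cons c rest ih =>
    simp only [List.foldl_cons, List.filterMap_cons]
    cases h : PySem.Dict.get? rd c with
    | none => simp [candOf, h, ih]
    | some v => by_cases hv : v = "" <;> simp [candOf, h, hv, ih]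

lemma altLoop_eq_any (rd : PySem.Dict String String) (pac : Option String) (dref nref : String)
    (claves : List String) :
    altLoop rd pac dref nref claves
    = (claves.filterMap (candOf rd)).any (fun valor =>
        let p := splitPatientVisualId valor
        (pacTruthy pac && pac == some valor)
        || (dref ≠ "" && ((p.2 ≠ "" && p.2 == dref) || valor == dref))
        || (nref ≠ "" && !(dref ≠ "" && p.2 ≠ "" && p.2 ≠ dref)
            && normalizePatientName p.1 == nref)) := by
  induction claves with
  | nil => simp [altLoop]
  | cons c rest ih =>
    simp only [altLoop, List.filterMap_cons]
    cases h : PySem.Dict.get? rd c with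
    | none => simp [candOf, h, ih]
    | some v => by_cases hv : v = "" <;> simp [candOf, h, hv, ih, Bool.or_assoc, Bool.beq_eq_decide_eq]

lemma if_guard (g m : Bool) : (if g = true then false else m) = (!g && m) := by
  cases g <;> simp

lemma if_bool_or (b x : Bool) : (if b = true then true else x) = (b || x) := by
  cases b <;> simp

lemma any_const_and (l : List String) (c : Bool) (p : String → Bool) :
    (l.any fun v => c && p v) = (c && l.any p) := by
  cases c <;> simp

lemma any_orB (l : List String) (p q : String → Bool) :
    (l.any fun v => p v || q v) = (l.any p || l.any q) := by
  induction l with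
  | nil => rfl
  | cons x t ih =>
    simp only [List.any_cons, ih]
    cases p x <;> cases q x <;> simp

-- the if-chain of A over any candidate list equals B's fused any
lemma chain_eq_fused (pac : Option String) (dref nref : String) (l : List String) :
    (if pacTruthy pac && l.any (fun valor => pac == some valor) then true
     else if dref ≠ "" && l.any (fun valor =>
            let dni_valor := (splitPatientVisualId valor).2
            (dni_valor ≠ "" && dni_valor == dref) || valor == dref) then true
     else if nref = "" then false
     else l.any (fun valor =>
            let p := splitPatientVisualId valor
            if dref ≠ "" && p.2 ≠ "" && p.2 ≠ dref then false
            else normalizePatientName p.1 == nref))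
    = l.any (fun valor =>
        let p := splitPatientVisualId valor
        (pacTruthy pac && pac == some valor)
        || (dref ≠ "" && ((p.2 ≠ "" && p.2 == dref) || valor == dref))
        || (nref ≠ "" && !(dref ≠ "" && p.2 ≠ "" && p.2 ≠ dref)
            && normalizePatientName p.1 == nref)) := by
  rw [if_bool_or, if_bool_or]
  rw [show (if nref = "" then false
           else l.any (fun valor =>
             let p := splitPatientVisualId valor
             if dref ≠ "" && p.2 ≠ "" && p.2 ≠ dref then false
             else normalizePatientName p.1 == nref))
        = (decide (nref ≠ "") && l.any (fun valor =>
             let p := splitPatientVisualId valor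
             !(dref ≠ "" && p.2 ≠ "" && p.2 ≠ dref) && normalizePatientName p.1 == nref))
      from by
        by_cases h : nref = ""
        · simp [h]
        · simp only [if_neg h]
          rw [show decide (nref ≠ "") = true by simp [h], Bool.true_and]
          congr 1
          funext valor
          exact if_guard _ _]
  rw [show (l.any (fun valor =>
        let p := splitPatientVisualId valor
        (pacTruthy pac && pac == some valor)
        || (dref ≠ "" && ((p.2 ≠ "" && p.2 == dref) || valor == dref))
        || (nref ≠ "" && !(dref ≠ "" && p.2 ≠ "" && p.2 ≠ dref)
            && normalizePatientName p.1 == nref)))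
      = ((l.any fun valor => pacTruthy pac && (pac == some valor))
         || ((l.any fun valor => decide (dref ≠ "") &&
               (let p := splitPatientVisualId valor
                ((p.2 ≠ "" && p.2 == dref) || valor == dref)))
         || (l.any fun valor => decide (nref ≠ "") &&
               (let p := splitPatientVisualId valor
                !(dref ≠ "" && p.2 ≠ "" && p.2 ≠ dref) && normalizePatientName p.1 == nref))))
      from by rw [← any_orB, ← any_orB]; simp [Bool.or_assoc, Bool.and_assoc]]
  rw [any_const_and, any_const_and, any_const_and]

-- ===== VERDICT (by name: the statement is the Claim_ definition above) =====
theorem record_matches_patient_py_spec : Claim_equal_record_matches_patient_py := by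
  intro record pac ctx _
  show record_matches_patient_py record pac ctx = record_matches_patient_py_alt record pac ctx
  simp only [record_matches_patient_py, record_matches_patient_py_alt]
  rw [foldl_cands, altLoop_eq_any, List.nil_append]
  exact chain_eq_fused pac _ _ _
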